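-- pv_equiv track=rewrite | github.com/297118506/python | app.py | format_images
-- ===== SOURCE A (Python) =====
-- def format_images(image_links):
--     """根据图片链接生成HTML内容"""
--     if not image_links:
--         return ""
--     output = [f'<img src="{image_links[0]}">']
--     if len(image_links) > 1:
--         table_rows = []
--         for i in range(1, len(image_links)):
--             j = i - 1
--             td_class = "图片2" if (j + 1) % 2 == 0 else "图片1"
--             img_tag = f'<td class="{td_class}" style="background:#fff;border-radius:8px;padding:8px;border:1px solid #eee;width:50%;vertical-align:top;"><img src="{image_links[i]}"></td>'
--             if j % 2 == 0:
--                 table_rows.append("<tr>" + img_tag)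
--             else:
--                 table_rows[-1] += img_tag + "</tr>"
--         if (len(image_links) - 1) % 2 != 0:
--             if table_rows:
--                 table_rows[-1] += "</tr>"
--         output.append('<table style="border-spacing:16px 16px;width:100%;">')
--         output.extend(table_rows)
--         output.append('</table>')
--     return "\n".join(output)
-- ===== SOURCE B (Python) =====
-- def _cell(url, cls):
--     return f'<td class="{cls}" style="background:#fff;border-radius:8px;padding:8px;border:1px solid #eee;width:50%;vertical-align:top;"><img src="{url}"></td>'
--
--
-- def format_images(image_links):
--     """根据图片链接生成HTML内容"""
--     if not image_links:
--         return ""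
--     first = f'<img src="{image_links[0]}">'
--     if len(image_links) == 1:
--         return first
--     rest = image_links[1:]
--     rows = []
--     for k in range(0, len(rest), 2):
--         row = "<tr>" + _cell(rest[k], "图片1")
--         if k + 1 < len(rest):
--             row += _cell(rest[k + 1], "图片2")
--         rows.append(row + "</tr>")
--     return "\n".join([first, '<table style="border-spacing:16px 16px;width:100%;">'] + rows + ["</table>"])
-- ===== Notes on version B (the rewrite author's own statement) =====
-- stated objective: simpler
-- what changed: B iterates over the tail in strides of two and emits each complete '<tr>…</tr>' row at once, replacing A's per-image index loop that alternates between appending a half-row and mutating the previous list entry plus a post-loop fixup that patches a missing '</tr>' onto the last row when the count is odd.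
import Mathlib
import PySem

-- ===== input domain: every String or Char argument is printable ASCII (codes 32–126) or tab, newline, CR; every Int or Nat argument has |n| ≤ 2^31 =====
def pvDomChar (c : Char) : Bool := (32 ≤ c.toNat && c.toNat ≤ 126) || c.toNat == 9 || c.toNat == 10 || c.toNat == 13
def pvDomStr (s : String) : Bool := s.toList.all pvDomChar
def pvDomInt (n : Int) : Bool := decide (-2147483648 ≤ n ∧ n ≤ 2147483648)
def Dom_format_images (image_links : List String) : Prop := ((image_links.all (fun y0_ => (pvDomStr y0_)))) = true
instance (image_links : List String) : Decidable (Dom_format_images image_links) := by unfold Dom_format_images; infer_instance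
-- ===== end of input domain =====

-- B builds each complete <tr>…</tr> row from a pair of links at once instead of A's
-- index loop that mutates the previous row and patches a missing </tr> afterwards (objective: simpler).

-- ===== PORT A =====
-- the common <td …> style fragment of the f-string
def pvStyle : String := "\" style=\"background:#fff;border-radius:8px;padding:8px;border:1px solid #eee;width:50%;vertical-align:top;\"><img src=\""
def pvTableOpen : String := "<table style=\"border-spacing:16px 16px;width:100%;\">"

-- Python's table_rows[-1] += t; raises IndexError on [] — unreachable in format_images
-- (the i = 1 iteration always appends a row first), so the [] case is arbitrary.
def pvAppendLast (rows : List String) (t : String) : List String :=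
  match rows with
  | [] => []
  | [r] => [r ++ t]
  | r :: rs => r :: pvAppendLast rs t

def format_images (image_links : List String) : String :=
  if image_links = [] then ""
  else
    let output := ["<img src=\"" ++ PySem.List.pyGetD image_links 0 "" ++ "\">"]
    if 1 < image_links.length then
      let table_rows := (PySem.List.pyRange 1 (image_links.length : Int) 1).foldl
        (fun table_rows i =>
          let j := i - 1
          let td_class := if PySem.Int.mod (j + 1) 2 = 0 then "图片2" else "图片1"
          let img_tag := "<td class=\"" ++ td_class ++ pvStyle ++ PySem.List.pyGetD image_links i "" ++ "\"></td>"
          if PySem.Int.mod j 2 = 0 then table_rows ++ ["<tr>" ++ img_tag]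
          else pvAppendLast table_rows (img_tag ++ "</tr>")) []
      let table_rows := if PySem.Int.mod ((image_links.length : Int) - 1) 2 ≠ 0 then
          (if table_rows ≠ [] then pvAppendLast table_rows "</tr>" else table_rows)
        else table_rows
      PySem.Str.join "\n" (output ++ [pvTableOpen] ++ table_rows ++ ["</table>"])
    else
      PySem.Str.join "\n" output

-- ===== PORT B =====
def pvCell (url : String) (cls : String) : String :=
  "<td class=\"" ++ cls ++ pvStyle ++ url ++ "\"></td>"

-- the stride-2 loop of Source B: one finished row per (pair of) remaining link(s)
def pvRows : List String → List String
  | [] => []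
  | [x] => [("<tr>" ++ pvCell x "图片1") ++ "</tr>"]
  | x :: y :: r => ((("<tr>" ++ pvCell x "图片1") ++ pvCell y "图片2") ++ "</tr>") :: pvRows r

def format_images_alt (image_links : List String) : String :=
  match image_links with
  | [] => ""
  | [x] => "<img src=\"" ++ x ++ "\">"
  | x :: rest =>
      PySem.Str.join "\n"
        (["<img src=\"" ++ x ++ "\">", pvTableOpen] ++ pvRows rest ++ ["</table>"])

-- ===== PRECONDITION & SPEC =====
def Spec_format_images (image_links : List String) (out : String) : Prop := out = format_images_alt image_links
instance (image_links : List String) (out : String) : Decidable (Spec_format_images image_links out) := by unfold Spec_format_images; infer_instance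

-- ===== CLAIM (what is proved, stated in full; the proofs are below) =====
def Claim_equal_format_images : Prop := ∀ (image_links : List String), Dom_format_images image_links → Spec_format_images image_links (format_images image_links)

-- ===== LEMMAS AND PROOFS =====

-- A's loop, re-indexed over the tail with a Nat counter
def goA : Nat → List String → List String → List String
  | _, [], acc => acc
  | j, u :: r, acc =>
      let td_class := if (j + 1) % 2 = 0 then "图片2" else "图片1"
      let img_tag := "<td class=\"" ++ td_class ++ pvStyle ++ u ++ "\"></td>"
      goA (j + 1) r
        (if j % 2 = 0 then acc ++ ["<tr>" ++ img_tag]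
         else pvAppendLast acc (img_tag ++ "</tr>"))

-- A's post-loop </tr> fixup
def fixA (r : List String) (rows : List String) : List String :=
  if r.length % 2 = 1 then (if rows ≠ [] then pvAppendLast rows "</tr>" else rows) else rows

theorem pvAppendLast_append (acc : List String) (a t : String) :
    pvAppendLast (acc ++ [a]) t = acc ++ [a ++ t] := by
  induction acc with
  | nil => rfl
  | cons b bs ih =>
      cases bs with
      | nil => simp [pvAppendLast]
      | cons c cs => simpa [pvAppendLast] using ih

theorem fold_eq_goA (x : String) (rest : List String) :
    ∀ (r : List String) (j : Nat), rest.drop j = r → ∀ acc,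
    (PySem.List.pyRange ((j : Int) + 1) ((rest.length : Int) + 1) 1).foldl
      (fun table_rows i =>
        let j := i - 1
        let td_class := if PySem.Int.mod (j + 1) 2 = 0 then "图片2" else "图片1"
        let img_tag := "<td class=\"" ++ td_class ++ pvStyle ++ PySem.List.pyGetD (x :: rest) i "" ++ "\"></td>"
        if PySem.Int.mod j 2 = 0 then table_rows ++ ["<tr>" ++ img_tag]
        else pvAppendLast table_rows (img_tag ++ "</tr>")) acc
    = goA j r acc := by
  intro r
  induction r with
  | nil =>
      intro j hj acc
      have hlen : rest.length ≤ j := by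
        by_contra h
        have := List.drop_eq_nil_iff.mp hj
        omega
      rw [PySem.List.pyRange_one_eq_nil (by exact_mod_cast by omega)]
      rfl
  | cons u r' ih =>
      intro j hj acc
      have hjl : j < rest.length := by
        by_contra h
        rw [List.drop_eq_nil_of_le (by omega)] at hj
        simp at hj
      have hget : rest.getD j "" = u := by
        have h0 : rest[j]? = some u := by
          have h : (rest.drop j)[0]? = some u := by rw [hj]; rfl
          simpa [List.getElem?_drop] using h
        simp [List.getD_eq_getElem?_getD, h0]
      rw [PySem.List.pyRange_one_cons (by exact_mod_cast by omega)]
      rw [List.foldl_cons]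
      have harg : ((j : Int) + 1) = ((j + 1 : Nat) : Int) := by push_cast; ring
      have hdrop : rest.drop (j + 1) = r' := by
        have : rest.drop (j + 1) = (rest.drop j).drop 1 := by
          rw [List.drop_drop]
        rw [this, hj]; rfl
      rw [show ((j : Int) + 1 + 1) = ((j + 1 : Nat) : Int) + 1 by push_cast; ring]
      rw [ih (j + 1) hdrop]
      -- reduce the step's Int arithmetic to goA's Nat arithmetic
      have e1 : (j : Int) + 1 - 1 = ((j : Nat) : Int) := by ring
      simp only [harg, goA]
      congr 1
      have m1 : PySem.Int.mod ((j + 1 : Nat) : Int) 2 = (((j + 1) % 2 : Nat) : Int) := by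
        exact_mod_cast PySem.Int.mod_natCast (j + 1) 2
      have m0 : PySem.Int.mod (((j + 1 : Nat) : Int) - 1) 2 = ((j % 2 : Nat) : Int) := by
        rw [show (((j + 1 : Nat) : Int) - 1) = ((j : Nat) : Int) by push_cast; ring]
        exact_mod_cast PySem.Int.mod_natCast j 2
      have g1 : PySem.List.pyGetD (x :: rest) ((j + 1 : Nat) : Int) "" = u := by
        rw [PySem.List.pyGetD_natCast]
        simpa [List.getD_cons_succ] using hget
      rw [show (((j + 1 : Nat) : Int) - 1 + 1) = ((j + 1 : Nat) : Int) by ring]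
      rw [m1, m0, g1]
      simp only [Nat.cast_eq_zero]

theorem goA_rows : ∀ (r : List String) (j : Nat), j % 2 = 0 → ∀ acc,
    fixA r (goA j r acc) = acc ++ pvRows r
  | [], j, hj, acc => by simp [goA, fixA, pvRows]
  | [u], j, hj, acc => by
      have h1 : (j + 1) % 2 ≠ 0 := by omega
      simp only [goA, fixA, pvRows]
      simp only [hj, h1, reduceIte]
      have hne : acc ++ ["<tr>" ++ pvCell u "图片1"] ≠ [] := by simp
      simp [pvCell, pvAppendLast_append]
  | u :: v :: r', j, hj, acc => by
      have h1 : (j + 1) % 2 ≠ 0 := by omega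
      have h2 : (j + 1 + 1) % 2 = 0 := by omega
      have hfix : ∀ rows, fixA (u :: v :: r') rows = fixA r' rows := by
        intro rows
        simp only [fixA, List.length_cons]
        have hp : (r'.length + 1 + 1) % 2 = r'.length % 2 := by omega
        simp [hp]
      rw [hfix]
      show fixA r' (goA j (u :: v :: r') acc) = acc ++ pvRows (u :: v :: r')
      simp only [goA, hj, h1, h2, reduceIte]
      rw [pvAppendLast_append]
      rw [goA_rows r' (j + 1 + 1) h2]
      simp [pvRows, pvCell, String.append_assoc]

theorem join_singleton_str (s : String) : PySem.Str.join "\n" [s] = s := by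
  simp [PySem.Str.join]

theorem fold_eq_goA0 (x : String) (rest : List String) (acc : List String) :
    (PySem.List.pyRange 1 ((rest.length : Int) + 1) 1).foldl
      (fun table_rows i =>
        let j := i - 1
        let td_class := if PySem.Int.mod (j + 1) 2 = 0 then "图片2" else "图片1"
        let img_tag := "<td class=\"" ++ td_class ++ pvStyle ++ PySem.List.pyGetD (x :: rest) i "" ++ "\"></td>"
        if PySem.Int.mod j 2 = 0 then table_rows ++ ["<tr>" ++ img_tag]
        else pvAppendLast table_rows (img_tag ++ "</tr>")) acc
    = goA 0 rest acc := by
  have h := fold_eq_goA x rest rest 0 (by simp) acc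
  simpa using h

theorem formatA_cons (x : String) (rest : List String) (h : rest ≠ []) :
    format_images (x :: rest) =
      PySem.Str.join "\n" (["<img src=\"" ++ x ++ "\">", pvTableOpen] ++ pvRows rest ++ ["</table>"]) := by
  have hne : (x :: rest) ≠ [] := by simp
  have hlen : 1 < (x :: rest).length := by
    cases rest with
    | nil => exact absurd rfl h
    | cons a b => simp
  simp only [format_images, if_neg hne, if_pos hlen]
  rw [show ((x :: rest).length : Int) = ((rest.length : Int) + 1) from by
    simp [List.length_cons]]
  rw [fold_eq_goA0]
  have hiff : (PySem.Int.mod ((rest.length : Int) + 1 - 1) 2 ≠ 0) ↔ rest.length % 2 = 1 := by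
    rw [show ((rest.length : Int) + 1 - 1) = ((rest.length : Nat) : Int) from by ring]
    rw [show PySem.Int.mod ((rest.length : Nat) : Int) 2 = ((rest.length % 2 : Nat) : Int) from by
      exact_mod_cast PySem.Int.mod_natCast rest.length 2]
    simp
    omega
  rw [if_congr hiff rfl rfl]
  have hfix : (if rest.length % 2 = 1 then
      (if goA 0 rest [] ≠ [] then pvAppendLast (goA 0 rest []) "</tr>" else goA 0 rest [])
      else goA 0 rest []) = fixA rest (goA 0 rest []) := rfl
  rw [hfix, goA_rows rest 0 rfl []]
  simp [PySem.List.pyGetD_zero_cons]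

-- ===== VERDICT (by name: the statement is the Claim_ definition above) =====
theorem format_images_spec : Claim_equal_format_images := by
  intro links _
  unfold Spec_format_images
  match links with
  | [] => rfl
  | [x] =>
      simp [format_images, format_images_alt, join_singleton_str, PySem.List.pyGetD_zero_cons]
  | x :: y :: rest' =>
      rw [formatA_cons x (y :: rest') (by simp)]
      rfl
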